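-- pv_equiv track=rewrite | github.com/catowabisabi/meow-code | api_server/services/session_memory/utils.py | analyze_section_sizes
-- ===== SOURCE A (Python) =====
-- def estimate_token_count(text: str) -> int:
--     """Rough estimation of token count (4 chars per token)."""
--     return len(text) // 4
--
-- def analyze_section_sizes(content: str) -> dict[str, int]:
--     """Analyze section sizes in the memory content."""
--     sections = {}
--     lines = content.split('\n')
--     current_section = ''
--     current_content = []
--
--     for line in lines:
--         if line.startswith('# '):
--             if current_section and current_content:
--                 section_content = '\n'.join(current_content).strip()
--                 sections[current_section] = estimate_token_count(section_content)
--             current_section = line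
--             current_content = []
--         else:
--             current_content.append(line)
--
--     if current_section and current_content:
--         section_content = '\n'.join(current_content).strip()
--         sections[current_section] = estimate_token_count(section_content)
--
--     return sections
-- ===== SOURCE B (Python) =====
-- def analyze_section_sizes(content: str) -> dict[str, int]:
--     """Boundary-scan rewrite: walk header-to-header chunks over a shrinking
--     suffix of the lines, no running section/content buffers."""
--     lines = content.split('\n')
--     sections = {}
--     while lines:
--         head, rest = lines[0], lines[1:]
--         if head.startswith('# '):
--             body = []
--             for l in rest:
--                 if l.startswith('# '):
--                     break
--                 body.append(l)
--             if body:
--                 sections[head] = len('\n'.join(body).strip()) // 4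
--             lines = rest[len(body):]
--         else:
--             lines = rest
--     return sections
-- ===== Notes on version B (the rewrite author's own statement) =====
-- stated objective: alternative
-- what changed: Replaced the streaming current_section/current_content state machine with flush-on-header-or-end by a boundary scan over a shrinking suffix: each header's whole body chunk is taken up to the next header and recorded immediately, so no running buffers or final flush exist.
import Mathlib
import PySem

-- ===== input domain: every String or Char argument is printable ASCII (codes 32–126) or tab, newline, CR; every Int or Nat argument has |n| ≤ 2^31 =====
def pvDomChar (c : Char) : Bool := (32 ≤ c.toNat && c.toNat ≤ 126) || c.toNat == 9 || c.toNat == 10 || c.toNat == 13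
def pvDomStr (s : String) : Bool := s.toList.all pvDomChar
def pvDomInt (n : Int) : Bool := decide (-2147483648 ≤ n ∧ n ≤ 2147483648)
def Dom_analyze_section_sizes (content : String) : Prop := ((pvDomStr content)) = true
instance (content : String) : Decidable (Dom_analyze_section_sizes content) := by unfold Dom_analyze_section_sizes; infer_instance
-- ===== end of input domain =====

-- B replaces A's streaming current_section/current_content buffers by a boundary scan over header-to-header chunks (alternative decomposition, same result).

-- ===== PORT A =====
-- estimate_token_count(text) = len(text) // 4
def estimate_token_count (text : String) : Int :=
  PySem.Int.floordiv (PySem.Str.len text) 4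

def analyze_section_sizes (content : String) : List (String × Int) :=
  let lines := (PySem.Str.split? content "\n").getD []   -- sep "\n" ≠ "", so split? is always `some` here
  let st :=
    lines.foldl
      (fun (st : PySem.Dict String Int × String × List String) line =>
        let (sections, current_section, current_content) := st
        if PySem.Str.startswith line "# " then
          let sections :=
            if current_section ≠ "" ∧ current_content ≠ [] then
              sections.insert current_section
                (estimate_token_count (PySem.Str.strip (PySem.Str.join "\n" current_content)))
            else sections
          (sections, line, [])
        else
          (sections, current_section, current_content ++ [line]))
      (PySem.Dict.empty, "", [])
  let (sections, current_section, current_content) := st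
  let sections :=
    if current_section ≠ "" ∧ current_content ≠ [] then
      sections.insert current_section
        (estimate_token_count (PySem.Str.strip (PySem.Str.join "\n" current_content)))
    else sections
  sections.items

-- ===== PORT B =====
-- not l.startswith('# ')
def nonHeader (l : String) : Bool := !(PySem.Str.startswith l "# ")

-- 'if body: sections[head] = len("\n".join(body).strip()) // 4'
def bflush (sections : PySem.Dict String Int) (head : String) (body : List String) :
    PySem.Dict String Int :=
  if body ≠ [] then
    sections.insert head
      (PySem.Int.floordiv (PySem.Str.len (PySem.Str.strip (PySem.Str.join "\n" body))) 4)
  else sections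

-- outer while over the shrinking suffix; the inner for/break body collection is takeWhile,
-- and 'lines = rest[len(body):]' is drop
def bloop (sections : PySem.Dict String Int) (lines : List String) : PySem.Dict String Int :=
  match lines with
  | [] => sections
  | head :: rest =>
    if PySem.Str.startswith head "# " then
      let body := rest.takeWhile nonHeader
      bloop (bflush sections head body) (rest.drop body.length)
    else bloop sections rest
termination_by lines.length
decreasing_by
  all_goals simp [List.length_drop]

def analyze_section_sizes_alt (content : String) : List (String × Int) :=
  (bloop PySem.Dict.empty ((PySem.Str.split? content "\n").getD [])).items

-- ===== PRECONDITION & SPEC =====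
def Spec_analyze_section_sizes (content : String) (out : List (String × Int)) : Prop := out = analyze_section_sizes_alt content
instance (content : String) (out : List (String × Int)) : Decidable (Spec_analyze_section_sizes content out) := by unfold Spec_analyze_section_sizes; infer_instance

-- ===== CLAIM (what is proved, stated in full; the proofs are below) =====
def Claim_equal_analyze_section_sizes : Prop := ∀ (content : String), Dom_analyze_section_sizes content → Spec_analyze_section_sizes content (analyze_section_sizes content)

-- ===== LEMMAS AND PROOFS =====

-- A's in-loop/final flush ('if current_section and current_content: …')
def flushA (d : PySem.Dict String Int) (cs : String) (cc : List String) : PySem.Dict String Int :=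
  if cs ≠ "" ∧ cc ≠ [] then
    d.insert cs (estimate_token_count (PySem.Str.strip (PySem.Str.join "\n" cc)))
  else d

-- A's loop + final flush, as structural recursion on the remaining lines
def aloop (d : PySem.Dict String Int) (cs : String) (cc : List String) :
    List String → PySem.Dict String Int
  | [] => flushA d cs cc
  | l :: ls =>
    if PySem.Str.startswith l "# " then aloop (flushA d cs cc) l [] ls
    else aloop d cs (cc ++ [l]) ls

lemma aloop_eq_foldl (ls : List String) (d : PySem.Dict String Int) (cs : String) (cc : List String) :
    aloop d cs cc ls =
      (fun st : PySem.Dict String Int × String × List String =>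
        flushA st.1 st.2.1 st.2.2)
      (ls.foldl
        (fun (st : PySem.Dict String Int × String × List String) line =>
          let (sections, current_section, current_content) := st
          if PySem.Str.startswith line "# " then
            let sections :=
              if current_section ≠ "" ∧ current_content ≠ [] then
                sections.insert current_section
                  (estimate_token_count (PySem.Str.strip (PySem.Str.join "\n" current_content)))
              else sections
            (sections, line, [])
          else
            (sections, current_section, current_content ++ [line]))
        (d, cs, cc)) := by
  induction ls generalizing d cs cc with
  | nil => simp [aloop]
  | cons l ls ih =>
    simp only [aloop, List.foldl_cons]
    by_cases h : PySem.Str.startswith l "# " = true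
    · simp only [h, if_pos, if_true]
      rw [ih]
      rfl
    · simp only [h, Bool.false_eq_true, if_false]
      rw [ih]

lemma drop_length_takeWhile {α : Type} (p : α → Bool) (ls : List α) :
    ls.drop (ls.takeWhile p).length = ls.dropWhile p := by
  induction ls with
  | nil => rfl
  | cons a ls ih =>
    by_cases h : p a
    · simp [List.takeWhile_cons, List.dropWhile_cons, h, ih]
    · simp [List.takeWhile_cons, List.dropWhile_cons, h]

lemma flushA_eq_bflush (d : PySem.Dict String Int) (h : String) (body : List String)
    (hne : h ≠ "") : flushA d h body = bflush d h body := by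
  unfold flushA bflush estimate_token_count
  by_cases hb : body = [] <;> simp [hb, hne]

lemma header_ne_empty (h : String) (hh : PySem.Str.startswith h "# " = true) : h ≠ "" := by
  intro he
  subst he
  exact absurd hh (by decide)

-- pending header h with accumulated body pre: the flush happens at the next header or at the end
lemma aloop_header (n : Nat) : ∀ (ls : List String), ls.length ≤ n →
    ∀ (d : PySem.Dict String Int) (h : String) (pre : List String),
    PySem.Str.startswith h "# " = true →
    aloop d h pre ls =
      bloop (bflush d h (pre ++ ls.takeWhile nonHeader)) (ls.dropWhile nonHeader) := by
  induction n with
  | zero =>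
    intro ls hlen d h pre hh
    have : ls = [] := List.eq_nil_of_length_eq_zero (Nat.le_zero.mp hlen)
    subst this
    rw [show aloop d h pre [] = flushA d h pre from rfl,
      show bloop (bflush d h (pre ++ List.takeWhile nonHeader [])) (List.dropWhile nonHeader [])
        = bflush d h pre from by unfold bloop; simp]
    exact flushA_eq_bflush d h pre (header_ne_empty h hh)
  | succ n ih =>
    intro ls hlen d h pre hh
    match ls with
    | [] =>
      rw [show aloop d h pre [] = flushA d h pre from rfl,
        show bloop (bflush d h (pre ++ List.takeWhile nonHeader [])) (List.dropWhile nonHeader [])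
          = bflush d h pre from by unfold bloop; simp]
      exact flushA_eq_bflush d h pre (header_ne_empty h hh)
    | l :: ls' =>
      have hlen' : ls'.length ≤ n := by simpa using hlen
      by_cases hl : PySem.Str.startswith l "# " = true
      · have hlc : PySem.Chars.startswith l.toList ['#', ' '] = true := hl
        have hp : nonHeader l = false := by simp [nonHeader, hlc]
        have h1 : aloop d h pre (l :: ls') = aloop (flushA d h pre) l [] ls' := by
          simp [aloop, hlc]
        rw [h1, ih ls' hlen' (flushA d h pre) l [] hl]
        have h2 : bloop (bflush d h (pre ++ (l :: ls').takeWhile nonHeader))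
              ((l :: ls').dropWhile nonHeader)
            = bloop (bflush (bflush d h pre) l (ls'.takeWhile nonHeader))
              (ls'.dropWhile nonHeader) := by
          rw [List.takeWhile_cons, List.dropWhile_cons]
          simp only [hp, Bool.false_eq_true, if_false, List.append_nil]
          conv_lhs => unfold bloop
          simp [hlc, drop_length_takeWhile]
        rw [h2, flushA_eq_bflush d h pre (header_ne_empty h hh)]
        simp
      · have hlc : PySem.Chars.startswith l.toList ['#', ' '] = false :=
          Bool.eq_false_iff.mpr hl
        have hp : nonHeader l = true := by simp [nonHeader, hlc]
        have h1 : aloop d h pre (l :: ls') = aloop d h (pre ++ [l]) ls' := by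
          simp [aloop, hlc]
        rw [h1, ih ls' hlen' d h (pre ++ [l]) hh,
          List.takeWhile_cons, List.dropWhile_cons]
        simp [hp, List.append_assoc]

-- before the first header nothing can flush (current_section is '')
lemma aloop_start (ls : List String) (d : PySem.Dict String Int) (cc : List String) :
    aloop d "" cc ls = bloop d ls := by
  induction ls generalizing cc with
  | nil => simp [aloop, bloop, flushA]
  | cons l ls ih =>
    by_cases hl : PySem.Str.startswith l "# " = true
    · have hlc : PySem.Chars.startswith l.toList ['#', ' '] = true := hl
      have h1 : aloop d "" cc (l :: ls) = aloop (flushA d "" cc) l [] ls := by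
        simp [aloop, hlc]
      have hflush : flushA d "" cc = d := by simp [flushA]
      rw [h1, hflush, aloop_header ls.length ls le_rfl d l [] hl]
      conv_rhs => unfold bloop
      simp [hlc, drop_length_takeWhile]
    · have hlc : PySem.Chars.startswith l.toList ['#', ' '] = false :=
        Bool.eq_false_iff.mpr hl
      have h1 : aloop d "" cc (l :: ls) = aloop d "" (cc ++ [l]) ls := by
        simp [aloop, hlc]
      rw [h1, ih]
      conv_rhs => unfold bloop
      simp [hlc]

-- ===== VERDICT (by name: the statement is the Claim_ definition above) =====
theorem analyze_section_sizes_spec : Claim_equal_analyze_section_sizes := by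
  intro content _
  show analyze_section_sizes content = analyze_section_sizes_alt content
  have h := aloop_eq_foldl ((PySem.Str.split? content "\n").getD []) PySem.Dict.empty "" []
  rw [aloop_start] at h
  exact congrArg PySem.Dict.items h.symm
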